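-- pv_equiv track=rewrite | github.com/rk22sm/AI_agent_Auto | lib/smart_cache_system_simple.py | _predict_next_access
-- ===== SOURCE A (Python) =====
-- from typing import Dict, List, Optional, Tuple, Any, Union
--
-- def _predict_next_access(pattern: List[str]) -> List[str]:
--     """Predict next likely access based on pattern."""
--     if len(pattern) < 3:
--         return []
--
--     # Simple pattern matching - look for sequences
--     predictions = []
--     for i in range(len(pattern) - 2):
--         sequence = pattern[i:i+2]
--         if pattern[i+2:i+3] and sequence[0] == pattern[-2] and sequence[1] == pattern[-1]:
--             predictions.append(pattern[i+2])
--
--     # Return unique predictions, most recent first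
--     return list(dict.fromkeys(reversed(predictions)))
-- ===== SOURCE B (Python) =====
-- def _predict_next_access(pattern):
--     """Predict next likely access based on pattern."""
--     if len(pattern) < 3:
--         return []
--     # Build a full bigram -> followers index in one pass, then look up the final bigram.
--     index = {}
--     for i in range(len(pattern) - 2):
--         index.setdefault((pattern[i], pattern[i + 1]), []).append(pattern[i + 2])
--     followers = index.get((pattern[-2], pattern[-1]), [])
--     return list(dict.fromkeys(reversed(followers)))
-- ===== Notes on version B (the rewrite author's own statement) =====
-- stated objective: alternative
-- what changed: B builds a dict index from each bigram to its accumulated followers in one pass and looks up the final bigram, instead of A's inline filter-collect comparing each window against pattern[-2:] while scanning.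
import Mathlib
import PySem

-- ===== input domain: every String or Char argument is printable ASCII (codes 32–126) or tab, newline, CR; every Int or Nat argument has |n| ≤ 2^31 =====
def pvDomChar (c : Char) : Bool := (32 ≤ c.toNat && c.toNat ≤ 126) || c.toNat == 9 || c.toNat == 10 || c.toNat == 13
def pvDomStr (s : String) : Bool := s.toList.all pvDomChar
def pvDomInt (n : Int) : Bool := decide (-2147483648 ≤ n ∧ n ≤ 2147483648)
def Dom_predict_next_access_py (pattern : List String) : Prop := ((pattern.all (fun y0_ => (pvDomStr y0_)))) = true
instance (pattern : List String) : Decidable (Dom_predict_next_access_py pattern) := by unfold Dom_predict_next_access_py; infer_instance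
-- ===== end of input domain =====

-- B builds a dict index from each bigram to its accumulated followers in one pass and looks up the
-- final bigram, instead of A's inline filter-collect comparing each window against pattern[-2:]
-- while scanning (objective: alternative decomposition, same cost).

-- ===== PORT A =====
def predict_next_access_py (pattern : List String) : List String :=
  if pattern.length < 3 then []
  else
    let predictions := (PySem.List.pyRange 0 ((pattern.length : Int) - 2) 1).foldl
      (fun acc i =>
        let sequence := PySem.List.slice pattern (some i) (some (i + 2))
        if PySem.List.slice pattern (some (i + 2)) (some (i + 3)) ≠ [] ∧
            PySem.List.pyGetD sequence 0 "" = PySem.List.pyGetD pattern (-2) "" ∧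
            PySem.List.pyGetD sequence 1 "" = PySem.List.pyGetD pattern (-1) ""
        then acc ++ [PySem.List.pyGetD pattern (i + 2) ""]
        else acc) []
    PySem.List.dedup predictions.reverse

-- ===== PORT B =====
def predict_next_access_py_alt (pattern : List String) : List String :=
  if pattern.length < 3 then []
  else
    let index := (PySem.List.pyRange 0 ((pattern.length : Int) - 2) 1).foldl
      (fun d i =>
        d.modify (PySem.List.pyGetD pattern i "", PySem.List.pyGetD pattern (i + 1) "") []
          (· ++ [PySem.List.pyGetD pattern (i + 2) ""]))
      PySem.Dict.empty
    let followers :=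
      index.getD (PySem.List.pyGetD pattern (-2) "", PySem.List.pyGetD pattern (-1) "") []
    PySem.List.dedup followers.reverse

-- ===== PRECONDITION & SPEC =====
def Spec_predict_next_access_py (pattern : List String) (out : List String) : Prop := out = predict_next_access_py_alt pattern
instance (pattern : List String) (out : List String) : Decidable (Spec_predict_next_access_py pattern out) := by unfold Spec_predict_next_access_py; infer_instance

-- ===== CLAIM (what is proved, stated in full; the proofs are below) =====
def Claim_equal_predict_next_access_py : Prop := ∀ (pattern : List String), Dom_predict_next_access_py pattern → Spec_predict_next_access_py pattern (predict_next_access_py pattern)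

-- ===== LEMMAS AND PROOFS =====

-- A's loop test at an admitted index i equals B's bigram-key comparison at i.
theorem cond_eq (pattern : List String) (i : Int)
    (hi : 0 ≤ i ∧ i < (pattern.length : Int) - 2) :
    decide (PySem.List.slice pattern (some (i + 2)) (some (i + 3)) ≠ [] ∧
        PySem.List.pyGetD (PySem.List.slice pattern (some i) (some (i + 2))) 0 "" =
          PySem.List.pyGetD pattern (-2) "" ∧
        PySem.List.pyGetD (PySem.List.slice pattern (some i) (some (i + 2))) 1 "" =
          PySem.List.pyGetD pattern (-1) "")
      = ((PySem.List.pyGetD pattern i "", PySem.List.pyGetD pattern (i + 1) "") ==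
          (PySem.List.pyGetD pattern (-2) "", PySem.List.pyGetD pattern (-1) "")) := by
  obtain ⟨m, rfl⟩ : ∃ m : Nat, i = (m : Int) := ⟨i.toNat, (Int.toNat_of_nonneg hi.1).symm⟩
  have hm : m + 2 < pattern.length := by omega
  have e2 : (m:Int) + 2 = ((m+2 : Nat) : Int) := by push_cast; ring
  have e3 : (m:Int) + 3 = ((m+3 : Nat) : Int) := by push_cast; ring
  have e1 : (m:Int) + 1 = ((m+1 : Nat) : Int) := by push_cast; ring
  have hslice : PySem.List.slice pattern (some ((m:Int) + 2)) (some ((m:Int) + 3)) ≠ [] := by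
    rw [e2, e3, PySem.List.slice_natCast]
    simp [List.drop_eq_nil_iff]
    omega
  have h0 : PySem.List.pyGetD (PySem.List.slice pattern (some (m:Int)) (some ((m:Int) + 2))) 0 ""
      = pattern[m] := by
    rw [e2, PySem.List.slice_natCast, PySem.List.pyGetD_zero,
      List.getD_eq_getElem _ _ (by simp; omega)]
    simp [List.getElem_take, List.getElem_drop]
  have h1 : PySem.List.pyGetD (PySem.List.slice pattern (some (m:Int)) (some ((m:Int) + 2))) 1 ""
      = pattern[m+1] := by
    rw [e2, PySem.List.slice_natCast, show (1:Int) = ((1:Nat):Int) by norm_num,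
      PySem.List.pyGetD_natCast, List.getD_eq_getElem _ _ (by simp; omega)]
    simp [List.getElem_take, List.getElem_drop]
  have hgm : PySem.List.pyGetD pattern (m:Int) "" = pattern[m] := by
    rw [PySem.List.pyGetD_natCast, List.getD_eq_getElem _ _ (by omega)]
  have hgm1 : PySem.List.pyGetD pattern ((m:Int) + 1) "" = pattern[m+1] := by
    rw [e1, PySem.List.pyGetD_natCast, List.getD_eq_getElem _ _ (by omega)]
  rw [h0, h1, hgm, hgm1]
  rw [Bool.eq_iff_iff]
  simp only [decide_eq_true_eq, beq_iff_eq, Prod.mk.injEq, hslice,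
    ne_eq, not_false_eq_true, true_and]

-- On patterns of length ≥ 3 both programs produce the same list: A's filter-collected
-- predictions coincide with B's dict lookup at the final bigram.
theorem predict_lists_eq (pattern : List String) (h3 : ¬ pattern.length < 3) :
    predict_next_access_py pattern = predict_next_access_py_alt pattern := by
  simp only [predict_next_access_py, predict_next_access_py_alt, if_neg h3]
  have hB : ((PySem.List.pyRange 0 ((pattern.length : Int) - 2) 1).foldl
      (fun d i =>
        d.modify (PySem.List.pyGetD pattern i "", PySem.List.pyGetD pattern (i + 1) "") []
          (· ++ [PySem.List.pyGetD pattern (i + 2) ""]))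
      PySem.Dict.empty).getD
        (PySem.List.pyGetD pattern (-2) "", PySem.List.pyGetD pattern (-1) "") []
      = (((PySem.List.pyRange 0 ((pattern.length : Int) - 2) 1).map
          (fun i => ((PySem.List.pyGetD pattern i "", PySem.List.pyGetD pattern (i + 1) ""),
            PySem.List.pyGetD pattern (i + 2) ""))).foldl
          (fun d p => d.modify p.1 [] (· ++ [p.2])) PySem.Dict.empty).getD
        (PySem.List.pyGetD pattern (-2) "", PySem.List.pyGetD pattern (-1) "") [] := by
    rw [List.foldl_map]
  rw [hB, PySem.Dict.getD_foldl_modify_append, PySem.Dict.getD_empty, List.nil_append,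
    List.filter_map, List.map_map, PySem.List.foldl_append_ite
      (p := fun i => PySem.List.slice pattern (some (i + 2)) (some (i + 3)) ≠ [] ∧
        PySem.List.pyGetD (PySem.List.slice pattern (some i) (some (i + 2))) 0 "" =
          PySem.List.pyGetD pattern (-2) "" ∧
        PySem.List.pyGetD (PySem.List.slice pattern (some i) (some (i + 2))) 1 "" =
          PySem.List.pyGetD pattern (-1) "")
      (f := fun i => PySem.List.pyGetD pattern (i + 2) ""), List.nil_append]
  rw [List.filter_congr (fun i hi => by
    have := (PySem.List.mem_pyRange_one).1 hi
    exact cond_eq pattern i (by omega))]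
  rfl

-- ===== VERDICT (by name: the statement is the Claim_ definition above) =====
theorem predict_next_access_py_spec : Claim_equal_predict_next_access_py := by
  intro pattern _
  unfold Spec_predict_next_access_py
  by_cases h3 : pattern.length < 3
  · simp [predict_next_access_py, predict_next_access_py_alt, h3]
  · exact predict_lists_eq pattern h3
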